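-- pv_equiv track=rewrite | github.com/savaleyash004/PasswordShield | src/utils/feature_extraction.py | _consecAlphaUCTransform
-- ===== SOURCE A (Python) =====
-- def _consecAlphaUCTransform(text: str) -> int:
--     """Calculate the count of consecutive uppercase alphabetic characters in the input text.
--
--     Args:
--         text (str): Input text.
--
--     Returns:
--         int: Count of consecutive uppercase alphabetic characters in the input text.
--     """
--     temp = ""
--     nConsecAlphaUC = 0
--     for a in text:
--         if a.isupper():
--             if temp and temp[-1] == a:
--                 nConsecAlphaUC += 1
--             temp = a
--     return nConsecAlphaUC
-- ===== SOURCE B (Python) =====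
-- def _consecAlphaUCTransform(text: str) -> int:
--     """Count adjacent equal pairs among the uppercase characters of text,
--     by divide and conquer on the uppercase subsequence: pairs in a segment =
--     pairs in each half + the one pair straddling the midpoint."""
--     s = [c for c in text if c.isupper()]
--
--     def pairs(lo: int, hi: int) -> int:
--         if hi - lo < 2:
--             return 0
--         mid = (lo + hi) // 2
--         return pairs(lo, mid) + pairs(mid, hi) + (1 if s[mid - 1] == s[mid] else 0)
--
--     return pairs(0, len(s))
-- ===== Notes on version B (the rewrite author's own statement) =====
-- stated objective: alternative
-- what changed: Replaces A's single streaming loop carrying a running last-uppercase-char variable with a divide-and-conquer recursion over the filtered uppercase subsequence: pairs in a segment = pairs in each half plus the pair straddling the midpoint.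
import Mathlib
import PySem

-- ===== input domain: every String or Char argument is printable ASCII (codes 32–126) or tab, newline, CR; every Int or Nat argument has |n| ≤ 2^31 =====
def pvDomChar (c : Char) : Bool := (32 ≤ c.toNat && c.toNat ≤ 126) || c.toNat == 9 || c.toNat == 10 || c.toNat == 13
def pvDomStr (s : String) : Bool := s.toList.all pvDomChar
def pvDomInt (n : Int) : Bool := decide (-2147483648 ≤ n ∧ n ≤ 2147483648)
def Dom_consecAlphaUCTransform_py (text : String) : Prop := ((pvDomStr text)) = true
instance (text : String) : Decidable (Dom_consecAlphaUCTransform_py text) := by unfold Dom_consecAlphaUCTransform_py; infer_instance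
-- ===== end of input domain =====

-- B replaces A's single streaming loop (running last-uppercase-char variable) with a
-- divide-and-conquer recursion over the filtered uppercase subsequence (alternative decomposition).


-- ===== PORT A =====
-- A's loop: state (temp, nConsecAlphaUC); temp is the string holding the last uppercase char seen.
def consecAlphaUCStepA (st : List Char × Int) (a : Char) : List Char × Int :=
  if PySem.Chars.isupper a then
    if !st.1.isEmpty && (PySem.List.pyGet? st.1 (-1) == some a) then ([a], st.2 + 1)
    else ([a], st.2)
  else st

def consecAlphaUCTransform_py (text : String) : Int :=
  (text.toList.foldl consecAlphaUCStepA ([], 0)).2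

-- ===== PORT B =====
-- pairs(lo, hi): divide and conquer; the boundary pair is s[mid-1] == s[mid].
def pvDcPairs (s : List Char) (lo hi : Nat) : Int :=
  if hi - lo < 2 then 0
  else
    pvDcPairs s lo ((lo + hi) / 2) + pvDcPairs s ((lo + hi) / 2) hi +
      (if PySem.List.pyGet? s (((lo + hi) / 2 : Nat) - 1 : Int) == PySem.List.pyGet? s ((lo + hi) / 2 : Nat) then 1 else 0)
termination_by hi - lo
decreasing_by all_goals omega

def consecAlphaUCTransform_py_alt (text : String) : Int :=
  let s := text.toList.filter PySem.Chars.isupper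
  pvDcPairs s 0 s.length

-- ===== PRECONDITION & SPEC =====
def Spec_consecAlphaUCTransform_py (text : String) (out : Int) : Prop := out = consecAlphaUCTransform_py_alt text
instance (text : String) (out : Int) : Decidable (Spec_consecAlphaUCTransform_py text out) := by unfold Spec_consecAlphaUCTransform_py; infer_instance

-- ===== CLAIM (what is proved, stated in full; the proofs are below) =====
def Claim_equal_consecAlphaUCTransform_py : Prop := ∀ (text : String), Dom_consecAlphaUCTransform_py text → Spec_consecAlphaUCTransform_py text (consecAlphaUCTransform_py text)

-- ===== LEMMAS AND PROOFS =====

-- number of equal adjacent pairs in a list of chars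
def pairsN (xs : List Char) : Nat := (xs.zip (xs.drop 1)).countP (fun p => p.1 == p.2)

theorem pairsN_nil : pairsN [] = 0 := rfl
theorem pairsN_single (c : Char) : pairsN [c] = 0 := rfl

theorem pairsN_cons_cons (x y : Char) (t : List Char) :
    pairsN (x :: y :: t) = (if x == y then 1 else 0) + pairsN (y :: t) := by
  simp [pairsN, List.countP_cons]
  by_cases h : x = y <;> simp [h, Nat.add_comm]

theorem pairsN_short (xs : List Char) (h : xs.length ≤ 1) : pairsN xs = 0 := by
  match xs, h with
  | [], _ => rfl
  | [c], _ => rfl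

-- boundary term for concatenation
def pairsBd (u v : List Char) : Nat :=
  match u.getLast?, v.head? with
  | some a, some b => if a = b then 1 else 0
  | _, _ => 0

theorem pairsN_append (u v : List Char) :
    pairsN (u ++ v) = pairsN u + pairsN v + pairsBd u v := by
  induction u with
  | nil => simp [pairsN_nil, pairsBd]
  | cons x t ih =>
    cases t with
    | nil =>
      cases v with
      | nil => simp [pairsN_nil, pairsN_single, pairsBd]
      | cons y w =>
        simp only [List.singleton_append, pairsN_cons_cons, pairsN_single, pairsBd,
          List.getLast?_singleton, List.head?_cons]
        by_cases h : x = y <;> simp [h, Nat.add_comm]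
    | cons y t' =>
      have hb : pairsBd (x :: y :: t') v = pairsBd (y :: t') v := by
        simp [pairsBd, List.getLast?_cons_cons]
      have ih' : pairsN (y :: (t' ++ v)) = pairsN (y :: t') + pairsN v + pairsBd (y :: t') v := by
        simpa using ih
      simp only [List.cons_append, pairsN_cons_cons, ih', hb]
      omega

-- loop invariant for A
theorem stepA_upper_nil (a : Char) (n : Int) (hu : PySem.Chars.isupper a = true) :
    consecAlphaUCStepA ([], n) a = ([a], n) := by
  simp [consecAlphaUCStepA, hu]

theorem pyGet_neg_one_single (c : Char) : PySem.List.pyGet? [c] (-1) = some c := by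
  simp [PySem.List.pyGet?, PySem.List.pyIdx?]

theorem stepA_upper_single (c a : Char) (n : Int) (hu : PySem.Chars.isupper a = true) :
    consecAlphaUCStepA ([c], n) a = ([a], if c = a then n + 1 else n) := by
  simp [consecAlphaUCStepA, hu, pyGet_neg_one_single]
  by_cases h : c = a <;> simp [h]

theorem stepA_lower (st : List Char × Int) (a : Char) (hu : PySem.Chars.isupper a = false) :
    consecAlphaUCStepA st a = st := by
  simp [consecAlphaUCStepA, hu]

theorem loopA (l : List Char) : ∀ (temp : List Char) (n : Int),
    (temp = [] ∨ ∃ c, temp = [c]) →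
    (l.foldl consecAlphaUCStepA (temp, n)).2
      = n + (pairsN (temp ++ l.filter PySem.Chars.isupper) : Int) := by
  induction l with
  | nil =>
    intro temp n h
    rcases h with h | ⟨c, h⟩ <;> simp [h, pairsN_nil, pairsN_single]
  | cons a l ih =>
    intro temp n h
    by_cases hu : PySem.Chars.isupper a = true
    · rcases h with h | ⟨c, h⟩
      · subst h
        rw [List.foldl_cons, stepA_upper_nil a n hu, ih [a] n (Or.inr ⟨a, rfl⟩)]
        simp [List.filter_cons, hu]
      · subst h
        rw [List.foldl_cons, stepA_upper_single c a n hu]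
        by_cases hca : c = a
        · rw [if_pos hca, ih [a] (n + 1) (Or.inr ⟨a, rfl⟩)]
          simp [hu, pairsN_cons_cons, hca]
          ring
        · rw [if_neg hca, ih [a] n (Or.inr ⟨a, rfl⟩)]
          simp [hu, pairsN_cons_cons, hca]
    · rw [List.foldl_cons, stepA_lower (temp, n) a (by simpa using hu), ih temp n h]
      simp [hu]

-- segment s[lo:hi]
def segC (s : List Char) (lo hi : Nat) : List Char := (s.drop lo).take (hi - lo)

theorem segC_append (s : List Char) (lo mid hi : Nat) (h1 : lo ≤ mid) (h2 : mid ≤ hi) :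
    segC s lo mid ++ segC s mid hi = segC s lo hi := by
  unfold segC
  have : hi - lo = (mid - lo) + (hi - mid) := by omega
  have hdd : List.drop (mid - lo) (List.drop lo s) = List.drop mid s := by
    rw [List.drop_drop]
    congr 1
    omega
  rw [this, List.take_add, hdd]

theorem segC_getLast? (s : List Char) (lo mid : Nat) (h1 : lo < mid) (h2 : mid ≤ s.length) :
    (segC s lo mid).getLast? = s[mid - 1]? := by
  have hlen : (segC s lo mid).length = mid - lo := by
    simp [segC]; omega
  rw [List.getLast?_eq_getElem?, hlen]
  unfold segC
  rw [List.getElem?_take_of_lt (by omega), List.getElem?_drop]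
  congr 1
  omega

theorem segC_head? (s : List Char) (mid hi : Nat) (h1 : mid < hi) :
    (segC s mid hi).head? = s[mid]? := by
  unfold segC
  rw [← List.head?_drop]
  cases hd : s.drop mid with
  | nil => simp
  | cons x t =>
    have : hi - mid = (hi - mid - 1) + 1 := by omega
    rw [this, List.take_succ_cons]
    simp

-- divide and conquer computes pairsN of the segment
theorem pvDcPairs_eq (s : List Char) (k : Nat) : ∀ (lo hi : Nat), hi - lo ≤ k → hi ≤ s.length →
    pvDcPairs s lo hi = (pairsN (segC s lo hi) : Int) := by
  induction k with
  | zero =>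
    intro lo hi hk _
    rw [pvDcPairs, if_pos (by omega)]
    rw [pairsN_short]
    · simp
    · simp [segC]; omega
  | succ k ih =>
    intro lo hi hk hlen
    by_cases hs : hi - lo < 2
    · rw [pvDcPairs, if_pos hs, pairsN_short]
      · simp
      · simp [segC]; omega
    · rw [pvDcPairs, if_neg hs]
      have hmid1 : lo + 1 ≤ (lo + hi) / 2 := by omega
      have hmid2 : (lo + hi) / 2 + 1 ≤ hi := by omega
      set mid := (lo + hi) / 2 with hmiddef
      rw [ih lo mid (by omega) (by omega), ih mid hi (by omega) hlen]
      rw [← segC_append s lo mid hi (by omega) (by omega), pairsN_append]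
      have hInt : ((mid : Int) - 1) = ((mid - 1 : Nat) : Int) := by omega
      have hg1 : PySem.List.pyGet? s ((mid : Int) - 1) = s[mid - 1]? := by
        rw [hInt, PySem.List.pyGet?_natCast]
      have hg2 : PySem.List.pyGet? s (mid : Int) = s[mid]? := by
        rw [PySem.List.pyGet?_natCast]
      have hm1 : mid - 1 < s.length := by omega
      have hm2 : mid < s.length := by omega
      obtain ⟨a, ha⟩ : ∃ a, s[mid - 1]? = some a := ⟨s[mid - 1], List.getElem?_eq_getElem hm1⟩
      obtain ⟨b, hb⟩ : ∃ b, s[mid]? = some b := ⟨s[mid], List.getElem?_eq_getElem hm2⟩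
      rw [hg1, hg2, ha, hb]
      have hbd : pairsBd (segC s lo mid) (segC s mid hi) = if a = b then 1 else 0 := by
        rw [pairsBd, segC_getLast? s lo mid (by omega) (by omega),
          segC_head? s mid hi (by omega), ha, hb]
      rw [hbd]
      by_cases hab : a = b <;> simp [hab]

-- ===== VERDICT (by name: the statement is the Claim_ definition above) =====
theorem consecAlphaUCTransform_py_spec : Claim_equal_consecAlphaUCTransform_py := by
  intro text _
  unfold Spec_consecAlphaUCTransform_py consecAlphaUCTransform_py consecAlphaUCTransform_py_alt
  rw [loopA _ [] 0 (Or.inl rfl)]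
  rw [pvDcPairs_eq _ _ 0 _ (le_refl _) (le_refl _)]
  simp [segC]
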